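-- pv_equiv track=rewrite | github.com/ThraexDev/masterarbeit | nimmt/Board.py | calculatebulls
-- ===== SOURCE A (Python) =====
-- def calculatebulls(batch):
--     bulls = 0
--     for cardnumber in range(0, len(batch)):
--         bulls = bulls + 1
--         if batch[cardnumber] % 5 == 0:
--             bulls = bulls + 1
--         if batch[cardnumber] % 10 == 0:
--             bulls = bulls + 1
--         if batch[cardnumber] == 11 or batch[cardnumber] == 22 or batch[cardnumber] == 33 or batch[
--             cardnumber] == 44 or batch[cardnumber] == 55 or batch[cardnumber] == 66 or batch[cardnumber] == 77 or \
--                 batch[cardnumber] == 88 or batch[cardnumber] == 99: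
--             bulls = bulls + 4
--     return bulls
-- ===== SOURCE B (Python) =====
-- def _score(c):
--     if c in (11, 22, 33, 44, 55, 66, 77, 88, 99):
--         return 6 if c == 55 else 5
--     if c % 10 == 0:
--         return 3
--     if c % 5 == 0:
--         return 2
--     return 1
--
--
-- def calculatebulls(batch):
--     counts = {}
--     for c in batch:
--         counts[c] = counts.get(c, 0) + 1
--     return sum(n * _score(c) for c, n in counts.items())
-- ===== Notes on version B (the rewrite author's own statement) =====
-- stated objective: alternative
-- what changed: Aggregates duplicates first into a count dictionary and scores each DISTINCT card once with a mutually-exclusive per-card value table (6/5/3/2/1), instead of A's per-index loop that adds the four overlapping bonuses for every card; total = sum of count*score over distinct cards.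
import Mathlib
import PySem

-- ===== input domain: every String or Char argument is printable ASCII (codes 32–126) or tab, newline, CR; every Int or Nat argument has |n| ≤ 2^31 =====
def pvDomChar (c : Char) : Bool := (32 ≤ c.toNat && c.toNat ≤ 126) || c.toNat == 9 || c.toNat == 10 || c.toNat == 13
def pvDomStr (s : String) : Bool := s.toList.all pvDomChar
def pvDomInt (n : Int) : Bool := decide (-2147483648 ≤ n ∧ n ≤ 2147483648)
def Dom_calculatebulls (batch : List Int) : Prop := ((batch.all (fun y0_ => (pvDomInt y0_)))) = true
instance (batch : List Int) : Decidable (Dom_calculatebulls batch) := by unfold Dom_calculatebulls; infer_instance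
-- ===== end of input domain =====

-- B counts duplicates into a dictionary first and scores each DISTINCT card once via a
-- mutually-exclusive value table, instead of A's per-index loop of overlapping bonuses (objective: alternative).

-- ===== PORT A =====
-- literal port: loop over range(0, len(batch)), indexing batch[cardnumber], additive bonuses
def calculatebulls (batch : List Int) : Int :=
  (PySem.List.pyRange 0 (batch.length : Int) 1).foldl
    (fun bulls cardnumber =>
      let bulls := bulls + 1
      let bulls := if PySem.Int.mod (PySem.List.pyGetD batch cardnumber 0) 5 = 0 then bulls + 1 else bulls
      let bulls := if PySem.Int.mod (PySem.List.pyGetD batch cardnumber 0) 10 = 0 then bulls + 1 else bulls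
      if PySem.List.pyGetD batch cardnumber 0 = 11 ∨ PySem.List.pyGetD batch cardnumber 0 = 22 ∨
         PySem.List.pyGetD batch cardnumber 0 = 33 ∨ PySem.List.pyGetD batch cardnumber 0 = 44 ∨
         PySem.List.pyGetD batch cardnumber 0 = 55 ∨ PySem.List.pyGetD batch cardnumber 0 = 66 ∨
         PySem.List.pyGetD batch cardnumber 0 = 77 ∨ PySem.List.pyGetD batch cardnumber 0 = 88 ∨
         PySem.List.pyGetD batch cardnumber 0 = 99 then bulls + 4 else bulls) 0

-- ===== PORT B =====
-- Source B's _score: exclusive decision chain, one value per card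
def bScore (c : Int) : Int :=
  if ([11, 22, 33, 44, 55, 66, 77, 88, 99] : List Int).contains c then
    (if c = 55 then 6 else 5)
  else if PySem.Int.mod c 10 = 0 then 3
  else if PySem.Int.mod c 5 = 0 then 2
  else 1

-- Source B: build counts dict (counts[c] = counts.get(c, 0) + 1), then sum n * _score(c) over items
def calculatebulls_alt (batch : List Int) : Int :=
  let counts := batch.foldl (fun d c => d.insert c (d.getD c 0 + 1)) PySem.Dict.empty
  (counts.items.map (fun p => p.2 * bScore p.1)).sum

-- ===== PRECONDITION & SPEC =====
def Spec_calculatebulls (batch : List Int) (out : Int) : Prop := out = calculatebulls_alt batch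
instance (batch : List Int) (out : Int) : Decidable (Spec_calculatebulls batch out) := by unfold Spec_calculatebulls; infer_instance

-- ===== CLAIM (what is proved, stated in full; the proofs are below) =====
def Claim_equal_calculatebulls : Prop := ∀ (batch : List Int), Dom_calculatebulls batch → Spec_calculatebulls batch (calculatebulls batch)

-- ===== LEMMAS AND PROOFS =====

-- A's per-card additive score
def aScore (c : Int) : Int :=
  (((1 : Int)
    + (if PySem.Int.mod c 5 = 0 then 1 else 0))
    + (if PySem.Int.mod c 10 = 0 then 1 else 0))
    + (if c = 11 ∨ c = 22 ∨ c = 33 ∨ c = 44 ∨ c = 55 ∨ c = 66 ∨ c = 77 ∨ c = 88 ∨ c = 99 then 4 else 0)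

theorem bScore_eq_aScore (c : Int) : bScore c = aScore c := by
  unfold bScore aScore
  by_cases hm : c = 11 ∨ c = 22 ∨ c = 33 ∨ c = 44 ∨ c = 55 ∨ c = 66 ∨ c = 77 ∨ c = 88 ∨ c = 99
  · rcases hm with h | h | h | h | h | h | h | h | h <;> subst h <;> decide
  · have hmc : ([11, 22, 33, 44, 55, 66, 77, 88, 99] : List Int).contains c = false := by
      simp only [List.contains_eq_mem, List.mem_cons, List.not_mem_nil, or_false,
        decide_eq_false_iff_not]
      exact hm
    rw [hmc]
    simp only [Bool.false_eq_true, if_false, if_neg hm, add_zero,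
      PySem.Int.mod_eq_zero_iff_dvd]
    by_cases h10 : (10 : Int) ∣ c
    · have h5 : (5 : Int) ∣ c := dvd_trans ⟨2, rfl⟩ h10
      norm_num [h10, h5]
    · by_cases h5 : (5 : Int) ∣ c <;> norm_num [h10, h5]

-- A = sum of the per-card additive scores
theorem calculatebulls_eq_sum (batch : List Int) :
    calculatebulls batch = (batch.map aScore).sum := by
  unfold calculatebulls
  rw [PySem.List.foldl_pyRange_zero_pyGetD' batch 0
      (fun bulls c =>
        let bulls := bulls + 1
        let bulls := if PySem.Int.mod c 5 = 0 then bulls + 1 else bulls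
        let bulls := if PySem.Int.mod c 10 = 0 then bulls + 1 else bulls
        if c = 11 ∨ c = 22 ∨ c = 33 ∨ c = 44 ∨ c = 55 ∨ c = 66 ∨ c = 77 ∨ c = 88 ∨ c = 99
        then bulls + 4 else bulls) 0]
  have : ∀ (init : Int),
      batch.foldl
        (fun bulls c =>
          let bulls := bulls + 1
          let bulls := if PySem.Int.mod c 5 = 0 then bulls + 1 else bulls
          let bulls := if PySem.Int.mod c 10 = 0 then bulls + 1 else bulls
          if c = 11 ∨ c = 22 ∨ c = 33 ∨ c = 44 ∨ c = 55 ∨ c = 66 ∨ c = 77 ∨ c = 88 ∨ c = 99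
          then bulls + 4 else bulls) init = init + (batch.map aScore).sum := by
    induction batch with
    | nil => simp
    | cons c cs ih =>
      intro init
      simp only [List.foldl_cons, List.map_cons, List.sum_cons, ih]
      unfold aScore
      split_ifs <;> ring
  simpa using this 0

-- summing count·f over a nodup list of keys covering batch equals summing f over batch
theorem sum_count_mul (f : Int → Int) (batch : List Int) :
    ∀ (ks : List Int), ks.Nodup → (∀ x ∈ batch, x ∈ ks) →
      (ks.map (fun k => (batch.count k : Int) * f k)).sum = (batch.map f).sum := by
  induction batch with
  | nil => intro ks _ _; simp
  | cons c cs ih =>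
    intro ks hnd hsub
    have hsum : (ks.map (fun k => ((c :: cs).count k : Int) * f k)).sum
        = (ks.map (fun k => (cs.count k : Int) * f k)).sum
          + (ks.map (fun k => if k = c then f k else 0)).sum := by
      rw [← List.sum_map_add]
      apply congrArg
      apply List.map_congr_left
      intro k _
      by_cases hk : k = c
      · subst hk
        rw [List.count_cons]
        push_cast
        simp
        ring
      · rw [List.count_cons]
        have h1 : ¬ c = k := fun h => hk h.symm
        simp [hk, h1]
    have hc : c ∈ ks := hsub c (List.mem_cons_self)
    have hone : ∀ (l : List Int), l.Nodup → c ∈ l →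
        (l.map (fun k => if k = c then f k else 0)).sum = f c := by
      intro l
      induction l with
      | nil => intro _ h; cases h
      | cons b m ihl =>
        intro hnd hm
        simp only [List.map_cons, List.sum_cons]
        rcases List.mem_cons.mp hm with h | h
        · subst h
          have hz : ∀ k ∈ m, (if k = c then f k else 0) = 0 := by
            intro k hk
            have : k ≠ c := fun he => (List.nodup_cons.mp hnd).1 (he ▸ hk)
            simp [this]
          rw [if_pos rfl, List.sum_eq_zero]
          · ring
          · intro x hx
            rcases List.mem_map.mp hx with ⟨k, hk, rfl⟩
            exact hz k hk
        · have hb : b ≠ c := fun he => (List.nodup_cons.mp hnd).1 (he ▸ h)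
          rw [if_neg hb, ihl (List.nodup_cons.mp hnd).2 h]
          ring
    rw [hsum, ih ks hnd (fun x hx => hsub x (List.mem_cons_of_mem _ hx)), hone ks hnd hc]
    simp [add_comm]

-- ===== VERDICT (by name: the statement is the Claim_ definition above) =====
theorem calculatebulls_spec : Claim_equal_calculatebulls := by
  intro batch _
  unfold Spec_calculatebulls calculatebulls_alt
  rw [PySem.Dict.foldl_insert_getD_add_one_eq_counter]
  show calculatebulls batch
      = ((PySem.Dict.counter batch).items.map (fun p => p.2 * bScore p.1)).sum
  rw [PySem.Dict.items_counter, List.map_map]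
  have : ((PySem.Set.ofList batch).map
      ((fun p : Int × Int => p.2 * bScore p.1) ∘ fun k => (k, (batch.count k : Int)))).sum
      = (batch.map bScore).sum := by
    have := sum_count_mul bScore batch (PySem.Set.ofList batch)
      (PySem.Set.nodup_ofList batch) (fun x hx => (PySem.Set.mem_ofList batch x).mpr hx)
    simpa [Function.comp] using this
  rw [this, calculatebulls_eq_sum]
  apply congrArg
  exact List.map_congr_left (fun c _ => (bScore_eq_aScore c).symm)
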